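-- pv_equiv track=rewrite | github.com/qlitre/qlitre-utils | src/qlitreutils/sequence.py | gen_decreasing_seq
-- ===== SOURCE A (Python) =====
-- from collections import deque
--
-- def gen_decreasing_seq(length: int, limit: int) -> list:
--     ret = []
--     que = deque()
--     for i in range(limit, 0, -1):
--         que.append(([i], 1))
--
--     while que:
--         al, depth = que.popleft()
--         if depth == length:
--             ret.append(al)
--         else:
--             last = al[-1]
--             # 0を含める場合はrange(last - 1, -1, -1)とする
--             for i in range(last - 1, 0, -1):
--                 que.append((al + [i], depth + 1))
--
--     return ret
-- ===== SOURCE B (Python) =====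
-- def gen_decreasing_seq(length: int, limit: int) -> list:
--     ret = []
--
--     def dfs(seq, depth):
--         if depth == length:
--             ret.append(seq)
--         else:
--             last = seq[-1]
--             for i in range(last - 1, 0, -1):
--                 dfs(seq + [i], depth + 1)
--
--     for i in range(limit, 0, -1):
--         dfs([i], 1)
--     return ret
-- ===== Notes on version B (the rewrite author's own statement) =====
-- stated objective: simpler
-- what changed: Replaces the deque-based breadth-first queue loop by a recursive depth-first backtracking enumeration; the descending choice order makes DFS emit the leaves in the same descending-lexicographic order as the BFS.
import Mathlib
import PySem

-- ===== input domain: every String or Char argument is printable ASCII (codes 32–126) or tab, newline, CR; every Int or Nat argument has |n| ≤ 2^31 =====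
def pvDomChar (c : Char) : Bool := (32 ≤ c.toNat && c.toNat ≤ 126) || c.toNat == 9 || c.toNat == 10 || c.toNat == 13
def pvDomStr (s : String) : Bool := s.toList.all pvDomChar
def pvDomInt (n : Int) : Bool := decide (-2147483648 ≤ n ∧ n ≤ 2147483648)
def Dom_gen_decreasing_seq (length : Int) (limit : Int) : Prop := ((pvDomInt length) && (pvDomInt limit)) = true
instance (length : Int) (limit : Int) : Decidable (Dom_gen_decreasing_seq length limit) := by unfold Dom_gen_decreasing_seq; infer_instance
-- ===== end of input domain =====

-- B replaces A's deque-based BFS by a recursive DFS backtracking enumeration (simpler decomposition, same output order).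

-- ===== PORT A =====
-- al[-1] / seq[-1] (shared by both ports); every list reaching it is nonempty, so the default 0 is never used
def pvLast (al : List Int) : Int := (PySem.List.pyGet? al (-1)).getD 0

-- termination measure for the BFS queue: 3^(last element) summed over the queue
def pvMu (que : List (List Int × Int)) : Nat :=
  (que.map (fun p => 3 ^ (pvLast p.1).toNat)).sum

-- sum of 3^i for i in range(l-1, 0, -1) is < 3^l  (used by the termination proofs)
theorem pvChildSum (n : Nat) : ∀ l : Int, l.toNat ≤ n →
    ((PySem.List.pyRange (l - 1) 0 (-1)).map (fun i => 3 ^ i.toNat)).sum < 3 ^ l.toNat := by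
  induction n with
  | zero =>
    intro l hl
    rw [PySem.List.pyRange_neg_one_eq_nil (by omega)]
    simp only [List.map_nil, List.sum_nil]
    positivity
  | succ n ih =>
    intro l hl
    by_cases h : l - 1 ≤ 0
    · rw [PySem.List.pyRange_neg_one_eq_nil h]
      simp only [List.map_nil, List.sum_nil]
      positivity
    · rw [PySem.List.pyRange_neg_one_cons (by omega)]
      have h2 : (l - 1 - 1 : Int) = (l - 1) - 1 := by ring
      have := ih (l - 1) (by omega)
      rw [h2] at this ⊢
      simp only [List.map_cons, List.sum_cons]
      have hl3 : l.toNat = (l - 1).toNat + 1 := by omega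
      rw [hl3, pow_succ]
      omega

def bfsLoop (length : Int) (ret : List (List Int)) (que : List (List Int × Int)) : List (List Int) :=
  match que with
  | [] => ret
  | (al, depth) :: rest =>
    if depth == length then
      bfsLoop length (ret ++ [al]) rest
    else
      bfsLoop length ret
        (rest ++ (PySem.List.pyRange (pvLast al - 1) 0 (-1)).map (fun i => (al ++ [i], depth + 1)))
termination_by pvMu que
decreasing_by
  · simp only [pvMu, List.map_cons, List.sum_cons]
    have : 0 < 3 ^ (pvLast al).toNat := by positivity
    omega
  · simp only [pvMu, List.map_append, List.sum_append, List.map_cons, List.sum_cons, List.map_map]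
    have he : ((PySem.List.pyRange (pvLast al - 1) 0 (-1)).map
        ((fun p => 3 ^ (pvLast p.1).toNat) ∘ fun i => (al ++ [i], depth + 1))) =
        ((PySem.List.pyRange (pvLast al - 1) 0 (-1)).map (fun i => 3 ^ i.toNat)) := by
      apply List.map_congr_left
      intro i _
      simp [pvLast, PySem.List.pyGet?_neg_one_append_singleton]
    rw [he]
    have := pvChildSum (pvLast al).toNat (pvLast al) le_rfl
    omega

def gen_decreasing_seq (length : Int) (limit : Int) : List (List Int) :=
  bfsLoop length [] ((PySem.List.pyRange limit 0 (-1)).map (fun i => ([i], 1)))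

-- ===== PORT B =====
-- the inner recursive dfs of B, threading ret as accumulator
def dfsB (length : Int) (seq : List Int) (depth : Int) (ret : List (List Int)) : List (List Int) :=
  if depth == length then ret ++ [seq]
  else
    (PySem.List.pyRange (pvLast seq - 1) 0 (-1)).attach.foldl
      (fun acc p => dfsB length (seq ++ [p.1]) (depth + 1) acc) ret
termination_by (pvLast seq).toNat
decreasing_by
  have hm := (PySem.List.mem_pyRange_neg_one).1 p.2
  have : pvLast (seq ++ [p.1]) = p.1 := by
    simp [pvLast, PySem.List.pyGet?_neg_one_append_singleton]
  rw [this]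
  omega

def gen_decreasing_seq_alt (length : Int) (limit : Int) : List (List Int) :=
  (PySem.List.pyRange limit 0 (-1)).foldl (fun acc i => dfsB length [i] 1 acc) []

-- ===== PRECONDITION & SPEC =====
def Spec_gen_decreasing_seq (length : Int) (limit : Int) (out : List (List Int)) : Prop := out = gen_decreasing_seq_alt length limit
instance (length : Int) (limit : Int) (out : List (List Int)) : Decidable (Spec_gen_decreasing_seq length limit out) := by unfold Spec_gen_decreasing_seq; infer_instance

-- ===== CLAIM (what is proved, stated in full; the proofs are below) =====
def Claim_equal_gen_decreasing_seq : Prop := ∀ (length : Int) (limit : Int), Dom_gen_decreasing_seq length limit → Spec_gen_decreasing_seq length limit (gen_decreasing_seq length limit)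

-- ===== LEMMAS AND PROOFS =====

-- the list of leaves emitted below a node (proof-side counterpart of dfsB without accumulator)
def emitN (length : Int) (seq : List Int) (depth : Int) : List (List Int) :=
  if depth == length then [seq]
  else
    ((PySem.List.pyRange (pvLast seq - 1) 0 (-1)).attach.map
      (fun p => emitN length (seq ++ [p.1]) (depth + 1))).flatten
termination_by (pvLast seq).toNat
decreasing_by
  have hm := (PySem.List.mem_pyRange_neg_one).1 p.2
  have : pvLast (seq ++ [p.1]) = p.1 := by
    simp [pvLast, PySem.List.pyGet?_neg_one_append_singleton]
  rw [this]
  omega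

theorem pvLast_append (seq : List Int) (i : Int) : pvLast (seq ++ [i]) = i := by
  simp [pvLast, PySem.List.pyGet?_neg_one_append_singleton]

theorem dfsB_eq (length : Int) : ∀ n (seq : List Int) (depth : Int) (ret : List (List Int)),
    (pvLast seq).toNat ≤ n →
    dfsB length seq depth ret = ret ++ emitN length seq depth := by
  intro n
  induction n with
  | zero =>
    intro seq depth ret h
    rw [dfsB, emitN]
    by_cases hd : depth == length
    · simp [hd]
    · simp only [hd, Bool.false_eq_true, if_false]
      rw [PySem.List.pyRange_neg_one_eq_nil (by omega)]
      simp
  | succ n ih =>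
    intro seq depth ret h
    rw [dfsB, emitN]
    by_cases hd : depth == length
    · simp [hd]
    · simp only [hd, Bool.false_eq_true, if_false]
      rw [PySem.List.foldl_congr_mem
        (g := fun acc (p : {x // x ∈ PySem.List.pyRange (pvLast seq - 1) 0 (-1)}) =>
          acc ++ emitN length (seq ++ [p.1]) (depth + 1))]
      · rw [PySem.List.foldl_append_eq_flatMap]
        simp [List.flatMap_def]
      · intro acc p hp
        have hm := (PySem.List.mem_pyRange_neg_one).1 p.2
        apply ih
        rw [pvLast_append]
        omega

-- leaves from a whole queue
def emitQ (length : Int) (que : List (List Int × Int)) : List (List Int) :=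
  (que.map (fun p => emitN length p.1 p.2)).flatten

theorem emitN_gt (length : Int) : ∀ n (seq : List Int) (depth : Int),
    (pvLast seq).toNat ≤ n → length < depth → emitN length seq depth = [] := by
  intro n
  induction n with
  | zero =>
    intro seq depth h hgt
    rw [emitN, if_neg (by simp only [beq_iff_eq]; omega)]
    rw [PySem.List.pyRange_neg_one_eq_nil (by omega)]
    simp
  | succ n ih =>
    intro seq depth h hgt
    rw [emitN, if_neg (by simp only [beq_iff_eq]; omega)]
    rw [List.flatten_eq_nil_iff]
    intro l hl
    simp only [List.mem_map, List.mem_attach, true_and] at hl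
    obtain ⟨p, hp⟩ := hl
    have hm := (PySem.List.mem_pyRange_neg_one).1 p.2
    rw [← hp]
    apply ih
    · rw [pvLast_append]; omega
    · omega

-- a node's leaves = concatenation of its children's leaves (when depth ≠ length)
theorem emitN_expand (length : Int) (seq : List Int) (depth : Int) (hd : (depth == length) = false) :
    emitN length seq depth =
      emitQ length ((PySem.List.pyRange (pvLast seq - 1) 0 (-1)).map
        (fun i => (seq ++ [i], depth + 1))) := by
  rw [emitN, if_neg (by simp [hd])]
  simp only [emitQ, List.map_map, Function.comp_def]
  congr 1
  exact List.attach_map_val (f := fun x => emitN length (seq ++ [x]) (depth + 1))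

-- MAIN INVARIANT: a queue consisting of a depth-d block followed by a depth-(d+1) block
-- is drained by the BFS into the deeper block's leaves followed by the shallow block's leaves.
theorem bfs_inv (length : Int) : ∀ n (d : Int) (A C : List (List Int × Int)) (ret : List (List Int)),
    pvMu (A ++ C) ≤ n →
    (∀ p ∈ A, p.2 = d) → (∀ p ∈ C, p.2 = d + 1) →
    bfsLoop length ret (A ++ C) = ret ++ emitQ length C ++ emitQ length A := by
  intro n
  induction n using Nat.strong_induction_on with
  | _ n ih =>
  intro d A C ret hmu hA hC
  match A, C with
  | [], [] => simp [bfsLoop, emitQ]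
  | [], c :: C' =>
    have hc := hC c (by simp)
    simp only [List.nil_append] at hmu ⊢
    rw [bfsLoop]
    by_cases hd : c.2 == length
    · rw [if_pos hd]
      have hmu' : pvMu (C' ++ []) < n := by
        simp only [pvMu, List.map_cons, List.sum_cons, List.append_nil] at hmu ⊢
        have : 0 < 3 ^ (pvLast c.1).toNat := by positivity
        omega
      have hrec := ih _ hmu' (d + 1) C' [] (ret ++ [c.1]) le_rfl
        (fun p hp => hC p (by simp [hp])) (by simp)
      simp only [List.append_nil] at hrec
      rw [hrec]
      have he : emitN length c.1 c.2 = [c.1] := by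
        rw [emitN, if_pos hd]
      simp [emitQ, he]
    · rw [if_neg hd]
      have hch : ∀ p ∈ (PySem.List.pyRange (pvLast c.1 - 1) 0 (-1)).map
          (fun i => (c.1 ++ [i], c.2 + 1)), p.2 = (d + 1) + 1 := by
        intro p hp
        simp only [List.mem_map] at hp
        obtain ⟨i, _, rfl⟩ := hp
        simp [hc]
      have hmu' : pvMu (C' ++ (PySem.List.pyRange (pvLast c.1 - 1) 0 (-1)).map
          (fun i => (c.1 ++ [i], c.2 + 1))) < n := by
        simp only [pvMu, List.map_cons, List.sum_cons, List.map_append, List.sum_append,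
          List.map_map] at hmu ⊢
        have he : ((PySem.List.pyRange (pvLast c.1 - 1) 0 (-1)).map
            ((fun p => 3 ^ (pvLast p.1).toNat) ∘ fun i => (c.1 ++ [i], c.2 + 1))) =
            ((PySem.List.pyRange (pvLast c.1 - 1) 0 (-1)).map (fun i => 3 ^ i.toNat)) := by
          apply List.map_congr_left
          intro i _
          simp [pvLast_append]
        rw [he]
        have := pvChildSum (pvLast c.1).toNat (pvLast c.1) le_rfl
        omega
      rw [ih _ hmu' (d + 1) C' _ ret le_rfl
        (fun p hp => hC p (by simp [hp])) hch]
      rw [← emitN_expand length c.1 c.2 (by simpa using hd)]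
      simp [emitQ]
  | a :: A', C =>
    have ha := hA a (by simp)
    simp only [List.cons_append] at hmu ⊢
    rw [bfsLoop]
    by_cases hd : a.2 == length
    · rw [if_pos hd]
      have hmu' : pvMu (A' ++ C) < n := by
        simp only [pvMu, List.map_cons, List.sum_cons] at hmu ⊢
        have : 0 < 3 ^ (pvLast a.1).toNat := by positivity
        omega
      rw [ih _ hmu' d A' C (ret ++ [a.1]) le_rfl
        (fun p hp => hA p (by simp [hp])) hC]
      -- C sits at depth length + 1, so it emits nothing and [a.1] commutes past it
      have hCnil : emitQ length C = [] := by
        simp only [emitQ, List.flatten_eq_nil_iff]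
        intro l hl
        simp only [List.mem_map] at hl
        obtain ⟨p, hp, rfl⟩ := hl
        apply emitN_gt length (pvLast p.1).toNat p.1 p.2 le_rfl
        have := hC p hp
        have hlen : a.2 = length := by simpa using hd
        omega
      have he : emitN length a.1 a.2 = [a.1] := by
        rw [emitN, if_pos hd]
      rw [hCnil]
      simp [emitQ, he]
    · rw [if_neg hd]
      have hch : ∀ p ∈ C ++ (PySem.List.pyRange (pvLast a.1 - 1) 0 (-1)).map
          (fun i => (a.1 ++ [i], a.2 + 1)), p.2 = d + 1 := by
        intro p hp
        rcases List.mem_append.1 hp with h | h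
        · exact hC p h
        · simp only [List.mem_map] at h
          obtain ⟨i, _, rfl⟩ := h
          simp [ha]
      have hmu' : pvMu (A' ++ (C ++ (PySem.List.pyRange (pvLast a.1 - 1) 0 (-1)).map
          (fun i => (a.1 ++ [i], a.2 + 1)))) < n := by
        simp only [pvMu, List.map_cons, List.sum_cons, List.map_append, List.sum_append,
          List.map_map] at hmu ⊢
        have he : ((PySem.List.pyRange (pvLast a.1 - 1) 0 (-1)).map
            ((fun p => 3 ^ (pvLast p.1).toNat) ∘ fun i => (a.1 ++ [i], a.2 + 1))) =
            ((PySem.List.pyRange (pvLast a.1 - 1) 0 (-1)).map (fun i => 3 ^ i.toNat)) := by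
          apply List.map_congr_left
          intro i _
          simp [pvLast_append]
        rw [he]
        have := pvChildSum (pvLast a.1).toNat (pvLast a.1) le_rfl
        omega
      have hassoc : A' ++ C ++ (PySem.List.pyRange (pvLast a.1 - 1) 0 (-1)).map
          (fun i => (a.1 ++ [i], a.2 + 1)) =
          A' ++ (C ++ (PySem.List.pyRange (pvLast a.1 - 1) 0 (-1)).map
          (fun i => (a.1 ++ [i], a.2 + 1))) := by simp
      rw [hassoc, ih _ hmu' d A' _ ret le_rfl
        (fun p hp => hA p (by simp [hp])) hch]
      have he := emitN_expand length a.1 a.2 (by simpa using hd)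
      simp only [emitQ, List.map_append, List.flatten_append] at *
      rw [← he]
      simp

theorem alt_eq (length limit : Int) :
    gen_decreasing_seq_alt length limit =
      emitQ length ((PySem.List.pyRange limit 0 (-1)).map (fun i => ([i], 1))) := by
  rw [gen_decreasing_seq_alt]
  rw [PySem.List.foldl_congr_mem (g := fun acc i => acc ++ emitN length [i] 1)]
  · rw [PySem.List.foldl_append_eq_flatMap]
    simp [emitQ, List.flatMap_def, List.map_map]
    rfl
  · intro acc i _
    exact dfsB_eq length (pvLast [i]).toNat [i] 1 acc le_rfl

-- ===== VERDICT (by name: the statement is the Claim_ definition above) =====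
theorem gen_decreasing_seq_spec : Claim_equal_gen_decreasing_seq := by
  intro length limit _
  unfold Spec_gen_decreasing_seq gen_decreasing_seq
  rw [alt_eq]
  have := bfs_inv length
    (pvMu (((PySem.List.pyRange limit 0 (-1)).map (fun i => (([i] : List Int), (1 : Int)))) ++ []))
    1 ((PySem.List.pyRange limit 0 (-1)).map (fun i => ([i], 1))) [] [] (by simp)
    (by intro p hp; simp only [List.mem_map] at hp; obtain ⟨i, _, rfl⟩ := hp; rfl)
    (by simp)
  simpa [emitQ] using this
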